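-- pv_equiv track=rewrite | github.com/Alejo-UTN/Parser_test | Lexer_tp.py | afdtoken16
-- ===== SOURCE A (Python) =====
-- estadofinal = "estado_final"
--
-- estadonofinal = "estado2 no aceptado"
--
-- estadotrampa = "esta en estado2 trampa"
--
-- def afdtoken16(lexema):
--     estado16 = 0
--     estadofinal16 = [1, 2, 3, 4]  # Estados finales válidos
--
--     for caracter in lexema:
--         if estado16 == 0 and caracter == '>':   # estado 1 para el caracter >
--                 estado16 = 1
--         elif estado16 == 0 and caracter == '<' : # estado 2 para el caracter <
--                 estado16 = 2
--         elif estado16 == 1 and caracter == '=' : # estado 3 para el caracter <=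
--              estado16 = 3
--         elif estado16 == 2 and caracter == '=' : # estado 4 para el caracetr >=
--             estado16 = 4
--         else:
--             estado16 = -1  # cualquier otro caracter hace que el adf se mande a un estado trampa py
--             break
--     if estado16 == -1:
--        return estadotrampa
--
--     if estado16 in estadofinal16:
--         return estadofinal
--     else:
--         return estadonofinal
-- ===== SOURCE B (Python) =====
-- estadofinal = "estado_final"
-- estadonofinal = "estado2 no aceptado"
-- estadotrampa = "esta en estado2 trampa"
--
-- def afdtoken16(lexema):
--     # The DFA accepts exactly the four operators; classify directly.
--     if lexema == "":
--         return estadonofinal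
--     if lexema in (">", "<", ">=", "<="):
--         return estadofinal
--     return estadotrampa
-- ===== Notes on version B (the rewrite author's own statement) =====
-- stated objective: simpler
-- what changed: Replaced the character-by-character DFA simulation loop with a direct closed-form classification: empty string -> non-final, one of the four operator strings -> final, anything else -> trap.
import Mathlib
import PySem

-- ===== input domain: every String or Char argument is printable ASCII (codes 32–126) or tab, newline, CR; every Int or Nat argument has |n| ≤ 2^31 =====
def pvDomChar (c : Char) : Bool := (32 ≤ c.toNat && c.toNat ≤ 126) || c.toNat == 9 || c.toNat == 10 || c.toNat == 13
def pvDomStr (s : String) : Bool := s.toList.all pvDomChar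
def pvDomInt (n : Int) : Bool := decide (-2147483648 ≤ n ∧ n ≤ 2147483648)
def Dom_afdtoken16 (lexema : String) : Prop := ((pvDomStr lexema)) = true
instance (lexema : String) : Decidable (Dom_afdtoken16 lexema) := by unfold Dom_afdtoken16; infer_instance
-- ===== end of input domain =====

-- B replaces A's character-by-character DFA loop with a direct closed-form
-- classification against the four accepted operator strings (simpler).

-- ===== PORT A =====
-- the for-loop with its early 'break' on the trap state, as structural recursion
def afdLoop16 : Int → List Char → Int
  | estado16, [] => estado16
  | estado16, caracter :: rest =>
    if estado16 = 0 ∧ caracter = '>' then afdLoop16 1 rest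
    else if estado16 = 0 ∧ caracter = '<' then afdLoop16 2 rest
    else if estado16 = 1 ∧ caracter = '=' then afdLoop16 3 rest
    else if estado16 = 2 ∧ caracter = '=' then afdLoop16 4 rest
    else (-1 : Int)  -- 'break' right after setting estado16 = -1

def afdtoken16 (lexema : String) : String :=
  let estadofinal16 : List Int := [1, 2, 3, 4]
  let estado16 := afdLoop16 0 lexema.toList
  if estado16 = -1 then "esta en estado2 trampa"
  else if estado16 ∈ estadofinal16 then "estado_final"
  else "estado2 no aceptado"

-- ===== PORT B =====
def afdtoken16_alt (lexema : String) : String :=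
  if lexema = "" then "estado2 no aceptado"
  else if lexema = ">" ∨ lexema = "<" ∨ lexema = ">=" ∨ lexema = "<=" then "estado_final"
  else "esta en estado2 trampa"

-- ===== PRECONDITION & SPEC =====
def Spec_afdtoken16 (lexema : String) (out : String) : Prop := out = afdtoken16_alt lexema
instance (lexema : String) (out : String) : Decidable (Spec_afdtoken16 lexema out) := by unfold Spec_afdtoken16; infer_instance

-- ===== CLAIM (what is proved, stated in full; the proofs are below) =====
def Claim_equal_afdtoken16 : Prop := ∀ (lexema : String), Dom_afdtoken16 lexema → Spec_afdtoken16 lexema (afdtoken16 lexema)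

-- ===== LEMMAS AND PROOFS =====

theorem str_eq_iff_toList (s : String) (l : List Char) (t : String) (ht : t.toList = l) :
    s = t ↔ s.toList = l := by
  constructor
  · rintro rfl; exact ht
  · intro h; exact String.toList_inj.mp (h.trans ht.symm)

-- the DFA result on a char list, fully classified by the list's shape
theorem afdtoken16_toList (lexema : String) :
    afdtoken16 lexema =
      (if lexema.toList = [] then "estado2 no aceptado"
       else if lexema.toList = ['>'] ∨ lexema.toList = ['<'] ∨
               lexema.toList = ['>', '='] ∨ lexema.toList = ['<', '='] then "estado_final"
       else "esta en estado2 trampa") := by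
  unfold afdtoken16
  cases h : lexema.toList with
  | nil => simp [afdLoop16]
  | cons c rest =>
    cases rest with
    | nil =>
      by_cases hc : c = '>'
      · subst hc; simp [afdLoop16]
      · by_cases hc2 : c = '<'
        · subst hc2; simp [afdLoop16]
        · simp [afdLoop16, hc, hc2]
    | cons c2 rest2 =>
      cases rest2 with
      | nil =>
        by_cases hc : c = '>'
        · subst hc
          by_cases hc2 : c2 = '='
          · subst hc2; simp [afdLoop16]
          · simp [afdLoop16, hc2]
        · by_cases hc1 : c = '<'
          · subst hc1
            by_cases hc2 : c2 = '='
            · subst hc2; simp [afdLoop16]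
            · simp [afdLoop16, hc2]
          · simp [afdLoop16, hc, hc1]
      | cons c3 rest3 =>
        -- length ≥ 3: the loop necessarily hits the trap state
        by_cases hc : c = '>'
        · subst hc
          by_cases hc2 : c2 = '='
          · subst hc2; simp [afdLoop16]
          · simp [afdLoop16, hc2]
        · by_cases hc1 : c = '<'
          · subst hc1
            by_cases hc2 : c2 = '='
            · subst hc2; simp [afdLoop16]
            · simp [afdLoop16, hc2]
          · simp [afdLoop16, hc, hc1]

-- ===== VERDICT (by name: the statement is the Claim_ definition above) =====
theorem afdtoken16_spec : Claim_equal_afdtoken16 := by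
  intro lexema _
  unfold Spec_afdtoken16 afdtoken16_alt
  rw [afdtoken16_toList]
  simp only [str_eq_iff_toList lexema [] "" rfl,
    str_eq_iff_toList lexema ['>'] ">" rfl,
    str_eq_iff_toList lexema ['<'] "<" rfl,
    str_eq_iff_toList lexema ['>', '='] ">=" rfl,
    str_eq_iff_toList lexema ['<', '='] "<=" rfl]
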